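-- pv_equiv track=rewrite | github.com/tymancjo/fourleg | Python/mk2_sim.py | setServos
-- ===== SOURCE A (Python) =====
-- def setServos(A,B):
--
--     zeromsg = "<42"
--
--     korekty = []
--     for _ in range(8):
--         korekty.append(0)
--
--     # korekty[2] = 10
--     # korekty[5] = 10
--
--     servos = [0,1,2,3,4,5,6,7]
--
--     for servo in range(8):
--         the_leg = servo // 2
--
--         Alfa = A[the_leg]
--         Beta = B[the_leg] - 120
--
--         if servo in servos:
--             if servo in [0,2,4,6]:
--                 Acor = Beta + korekty[servo]
--                 if servo in [0,1,4,5]: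
--                     Bcor = 180 - Acor
--                 else:
--                     Bcor = Acor
--                 zeromsg += f",{int(Bcor)}"
--             else:
--                 Acor = Alfa + korekty[servo]
--                 if servo in [0,1,4,5]:
--                     Bcor = 180 - Acor
--                 else:
--                     Bcor = Acor
--                 zeromsg += f",{int(Bcor)}"
--         else:
--             zeromsg +=",-1"
--
--     zeromsg +=">"
--     return zeromsg
-- ===== SOURCE B (Python) =====
-- def setServos(A, B):
--     msg = "<42"
--     for leg in range(4):
--         even = B[leg] - 120
--         odd = A[leg]
--         flip = (leg % 2 == 0)
--         msg += f",{int(180 - even if flip else even)},{int(180 - odd if flip else odd)}"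
--     return msg + ">"
-- ===== Notes on version B (the rewrite author's own statement) =====
-- stated objective: simpler
-- what changed: Replaces the 8-servo loop with its dead '-1' branch, the all-zero korekty array and the even/odd membership tests by a 4-leg loop that emits both servo values of a leg at once, flipping both by 180 when the leg index is even.
import Mathlib
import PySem

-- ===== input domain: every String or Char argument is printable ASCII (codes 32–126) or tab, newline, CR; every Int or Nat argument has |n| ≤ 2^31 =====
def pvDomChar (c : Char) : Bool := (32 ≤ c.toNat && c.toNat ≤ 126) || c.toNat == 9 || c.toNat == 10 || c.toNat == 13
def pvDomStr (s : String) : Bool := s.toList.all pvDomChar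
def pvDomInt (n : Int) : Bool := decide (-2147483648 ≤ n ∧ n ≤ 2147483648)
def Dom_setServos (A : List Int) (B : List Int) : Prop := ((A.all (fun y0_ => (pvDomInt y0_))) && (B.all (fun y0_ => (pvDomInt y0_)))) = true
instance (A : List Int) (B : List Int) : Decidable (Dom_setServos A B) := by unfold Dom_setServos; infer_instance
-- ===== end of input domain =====

-- B folds the 8-servo loop into a 4-leg loop (two values per iteration), dropping A's dead ",-1"
-- branch and the all-zero korekty corrections; equal return value on all inputs with ≥ 4 legs.

-- ===== PORT A =====
def setServos (A : List Int) (B : List Int) : String :=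
  let zeromsg := "<42"
  let korekty : List Int := (List.range 8).foldl (fun k _ => k ++ [(0 : Int)]) []
  let servos : List Int := [0,1,2,3,4,5,6,7]
  let zeromsg := (PySem.List.pyRange 0 8 1).foldl (fun msg servo =>
    let the_leg := PySem.Int.floordiv servo 2
    let Alfa := PySem.List.pyGetD A the_leg 0
    let Beta := PySem.List.pyGetD B the_leg 0 - 120
    if servo ∈ servos then
      if servo ∈ [(0 : Int), 2, 4, 6] then
        let Acor := Beta + PySem.List.pyGetD korekty servo 0
        let Bcor := if servo ∈ [(0 : Int), 1, 4, 5] then 180 - Acor else Acor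
        msg ++ "," ++ PySem.Int.toStr Bcor
      else
        let Acor := Alfa + PySem.List.pyGetD korekty servo 0
        let Bcor := if servo ∈ [(0 : Int), 1, 4, 5] then 180 - Acor else Acor
        msg ++ "," ++ PySem.Int.toStr Bcor
    else msg ++ ",-1") zeromsg
  zeromsg ++ ">"

-- ===== PORT B =====
def setServos_alt (A : List Int) (B : List Int) : String :=
  ((PySem.List.pyRange 0 4 1).foldl (fun msg leg =>
    let even := PySem.List.pyGetD B leg 0 - 120
    let odd := PySem.List.pyGetD A leg 0
    let flip := PySem.Int.mod leg 2 == 0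
    msg ++ "," ++ PySem.Int.toStr (if flip then 180 - even else even)
        ++ "," ++ PySem.Int.toStr (if flip then 180 - odd else odd)) "<42") ++ ">"

-- ===== PRECONDITION & SPEC =====
-- Pre_: Python A (and B) raise IndexError on A[leg]/B[leg] when either list has fewer than 4 elements.
def Pre_setServos (A : List Int) (B : List Int) : Prop := 4 ≤ A.length ∧ 4 ≤ B.length
instance (A : List Int) (B : List Int) : Decidable (Pre_setServos A B) := by unfold Pre_setServos; infer_instance
def pvWitness_setServos : List Int × List Int := ([0, 10, 20, 30], [120, 130, 140, 150])
def Spec_setServos (A : List Int) (B : List Int) (out : String) : Prop := out = setServos_alt A B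
instance (A : List Int) (B : List Int) (out : String) : Decidable (Spec_setServos A B out) := by unfold Spec_setServos; infer_instance

-- ===== CLAIM (what is proved, stated in full; the proofs are below) =====
def Claim_equal_setServos : Prop := ∀ (A : List Int) (B : List Int), Dom_setServos A B → Pre_setServos A B → Spec_setServos A B (setServos A B)

-- ===== LEMMAS AND PROOFS =====
theorem setServos_eq_alt (a0 a1 a2 a3 b0 b1 b2 b3 : Int) (ar br : List Int) :
    setServos (a0 :: a1 :: a2 :: a3 :: ar) (b0 :: b1 :: b2 :: b3 :: br)
      = setServos_alt (a0 :: a1 :: a2 :: a3 :: ar) (b0 :: b1 :: b2 :: b3 :: br) := by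
  simp [setServos, setServos_alt, PySem.List.pyRange, PySem.List.pyGetD, PySem.List.pyGet?,
        PySem.List.pyIdx?, PySem.Int.floordiv, PySem.Int.mod, List.range_succ]

-- ===== VERDICT (by name: the statement is the Claim_ definition above) =====
theorem setServos_spec : Claim_equal_setServos := by
  intro A B _ hpre
  match A, B, hpre with
  | a0 :: a1 :: a2 :: a3 :: ar, b0 :: b1 :: b2 :: b3 :: br, _ =>
    exact setServos_eq_alt a0 a1 a2 a3 b0 b1 b2 b3 ar br
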